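-- pv_equiv track=rewrite | github.com/vector-pool/vector-store | vectornet/miner_group/miner_group.py | make_miner_group
-- ===== SOURCE A (Python) =====
-- def make_miner_group(miner_status):
--     very_young_miers, young_miners, mature_miners, old_miners, very_old_miners = [], [], [], [], []
--
--     for miner in miner_status:
--         if miner['category'] == 'very_young':
--             very_young_miers.append(miner['uid'])
--         elif miner['category'] == 'young':
--             young_miners.append(miner['uid'])
--         elif miner['category'] == 'mature':
--             mature_miners.append(miner['uid'])
--         elif miner['category'] == 'old':
--             old_miners.append(miner['uid'])
--         else :
--             very_old_miners.append(miner['uid'])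
--
--     return very_young_miers, young_miners, mature_miners, old_miners, very_old_miners
-- ===== SOURCE B (Python) =====
-- def make_miner_group(miner_status):
--     very_young = [m['uid'] for m in miner_status if m['category'] == 'very_young']
--     young = [m['uid'] for m in miner_status if m['category'] == 'young']
--     mature = [m['uid'] for m in miner_status if m['category'] == 'mature']
--     old = [m['uid'] for m in miner_status if m['category'] == 'old']
--     very_old = [m['uid'] for m in miner_status
--                 if m['category'] not in ('very_young', 'young', 'mature', 'old')]
--     return very_young, young, mature, old, very_old
-- ===== Notes on version B (the rewrite author's own statement) =====
-- stated objective: idiomatic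
-- what changed: Replaced the single if/elif loop threading five accumulators by five independent filter-then-project list comprehensions, one per bucket, with the very_old bucket selected by a 'not in' test reproducing the else catch-all.
import Mathlib
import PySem

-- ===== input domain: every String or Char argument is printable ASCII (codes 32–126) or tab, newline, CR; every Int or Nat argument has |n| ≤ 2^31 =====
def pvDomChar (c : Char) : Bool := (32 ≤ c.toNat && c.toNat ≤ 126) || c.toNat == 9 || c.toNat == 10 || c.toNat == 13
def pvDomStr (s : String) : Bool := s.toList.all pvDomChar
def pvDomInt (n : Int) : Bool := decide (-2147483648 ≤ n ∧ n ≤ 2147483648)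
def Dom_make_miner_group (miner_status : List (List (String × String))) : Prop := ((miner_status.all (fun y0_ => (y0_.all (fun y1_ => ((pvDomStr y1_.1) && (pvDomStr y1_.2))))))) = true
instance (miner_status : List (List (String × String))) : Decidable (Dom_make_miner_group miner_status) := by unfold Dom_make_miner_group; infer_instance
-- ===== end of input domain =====

-- B changes A's single if/elif loop with five threaded accumulators into five independent
-- filter-and-project passes, one per bucket (idiomatic; same O(n) cost, no speed claim).
-- miner['k'] = first-match association-list lookup; Pre_ guarantees both keys exist,
-- so the "" default of pvLookup is never reached on admitted inputs.
def pvLookup (m : List (String × String)) (k : String) : String :=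
  ((m.find? (fun p => p.1 == k)).map (·.2)).getD ""

-- ===== PORT A =====
def goA (ms : List (List (String × String)))
    (vy y ma o vo : List String) :
    List String × List String × List String × List String × List String :=
  match ms with
  | [] => (vy, y, ma, o, vo)
  | m :: rest =>
    let c := pvLookup m "category"
    let u := pvLookup m "uid"
    if c = "very_young" then goA rest (vy ++ [u]) y ma o vo
    else if c = "young" then goA rest vy (y ++ [u]) ma o vo
    else if c = "mature" then goA rest vy y (ma ++ [u]) o vo
    else if c = "old" then goA rest vy y ma (o ++ [u]) vo
    else goA rest vy y ma o (vo ++ [u])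

def make_miner_group (miner_status : List (List (String × String))) : List String × List String × List String × List String × List String :=
  goA miner_status [] [] [] [] []

-- ===== PORT B =====
def bucket (miner_status : List (List (String × String))) (cat : String) : List String :=
  (miner_status.filter (fun m => pvLookup m "category" == cat)).map (fun m => pvLookup m "uid")

def bucketOther (miner_status : List (List (String × String))) : List String :=
  (miner_status.filter (fun m =>
      !(["very_young", "young", "mature", "old"].contains (pvLookup m "category")))).map
    (fun m => pvLookup m "uid")

def make_miner_group_alt (miner_status : List (List (String × String))) : List String × List String × List String × List String × List String :=
  (bucket miner_status "very_young", bucket miner_status "young",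
   bucket miner_status "mature", bucket miner_status "old", bucketOther miner_status)

-- ===== PRECONDITION & SPEC =====
-- Pre_ excludes miners missing a 'category' or 'uid' key, on which Python A raises KeyError.
def Pre_make_miner_group (miner_status : List (List (String × String))) : Prop :=
  ∀ m ∈ miner_status, (m.find? (fun p => p.1 == "category")).isSome ∧ (m.find? (fun p => p.1 == "uid")).isSome
instance (miner_status : List (List (String × String))) : Decidable (Pre_make_miner_group miner_status) := by unfold Pre_make_miner_group; infer_instance

def pvWitness_make_miner_group : (List (List (String × String))) :=
  [[("category", "young"), ("uid", "7")], [("category", "ancient"), ("uid", "8")]]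

def Spec_make_miner_group (miner_status : List (List (String × String))) (out : List String × List String × List String × List String × List String) : Prop := out = make_miner_group_alt miner_status
instance (miner_status : List (List (String × String))) (out : List String × List String × List String × List String × List String) : Decidable (Spec_make_miner_group miner_status out) := by unfold Spec_make_miner_group; infer_instance

-- ===== CLAIM (what is proved, stated in full; the proofs are below) =====
def Claim_equal_make_miner_group : Prop := ∀ (miner_status : List (List (String × String))), Dom_make_miner_group miner_status → Pre_make_miner_group miner_status → Spec_make_miner_group miner_status (make_miner_group miner_status)

-- ===== LEMMAS AND PROOFS =====
lemma goA_spec (ms : List (List (String × String))) :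
    ∀ vy y ma o vo, goA ms vy y ma o vo =
      (vy ++ bucket ms "very_young", y ++ bucket ms "young",
       ma ++ bucket ms "mature", o ++ bucket ms "old", vo ++ bucketOther ms) := by
  induction ms with
  | nil => intro vy y ma o vo; simp [goA, bucket, bucketOther]
  | cons m rest ih =>
    intro vy y ma o vo
    simp only [goA]
    split_ifs <;> simp_all [ih, bucket, bucketOther, List.contains_eq_mem]

theorem make_miner_group_spec : Claim_equal_make_miner_group := by
  intro ms _ _
  show make_miner_group ms = make_miner_group_alt ms
  simp [make_miner_group, make_miner_group_alt, goA_spec]
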